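-- pv_equiv track=rewrite | github.com/LRangg/MimoTree | AA_cluster_scoring.py | sort_seeds
-- ===== SOURCE A (Python) =====
-- def sort_seeds(all_seeds):
--     all_seeds_list = []
--     for g in range(len(all_seeds)):
--         seed_g = [r[2:] for r in all_seeds[g]]
--         seed_set = set(seed_g)
--         if len(seed_set) == len(seed_g):
--             all_seeds_list.append(all_seeds[g])
--     return all_seeds_list
-- ===== SOURCE B (Python) =====
-- def sort_seeds(all_seeds):
--     def suffixes(group):
--         return sorted(r[2:] for r in group)
--
--     def has_adjacent_dup(xs):
--         for x, y in zip(xs, xs[1:]):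
--             if x == y:
--                 return True
--         return False
--
--     return [g for g in all_seeds if not has_adjacent_dup(suffixes(g))]
-- ===== Notes on version B (the rewrite author's own statement) =====
-- stated objective: alternative
-- what changed: Detects duplicate seed suffixes by sorting them and scanning adjacent pairs instead of comparing the length of a hash set with the list length; the result is built by a single filtering comprehension rather than an index loop with an accumulator.
import Mathlib
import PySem

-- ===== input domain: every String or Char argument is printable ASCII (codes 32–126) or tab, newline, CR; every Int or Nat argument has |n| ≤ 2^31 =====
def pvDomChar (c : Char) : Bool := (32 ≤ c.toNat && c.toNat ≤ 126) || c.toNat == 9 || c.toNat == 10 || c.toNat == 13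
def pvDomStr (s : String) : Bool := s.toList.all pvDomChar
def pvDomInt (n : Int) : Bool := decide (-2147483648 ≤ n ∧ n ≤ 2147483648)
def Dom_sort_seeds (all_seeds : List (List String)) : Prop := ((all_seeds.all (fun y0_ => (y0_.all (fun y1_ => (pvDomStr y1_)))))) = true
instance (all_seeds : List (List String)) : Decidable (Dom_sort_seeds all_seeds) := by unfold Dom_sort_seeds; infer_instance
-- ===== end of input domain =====

-- B replaces A's hash-set-vs-list length comparison by a sort and adjacent-pair scan
-- of each group's suffixes, and builds the result with a filter (objective: alternative).

-- ===== PORT A =====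
-- 'for g in range(len(all_seeds)): seed_g = [r[2:] …]; if len(set(seed_g)) == len(seed_g): out.append(all_seeds[g])'
def sort_seeds (all_seeds : List (List String)) : List (List String) :=
  (PySem.List.pyRange 0 (PySem.List.len all_seeds)).foldl
    (fun all_seeds_list g =>
      let seed_g := (PySem.List.pyGetD all_seeds g []).map (fun r => PySem.Str.slice r (some 2) none)
      let seed_set : PySem.Set String := PySem.Set.ofList seed_g
      if PySem.Set.len seed_set = PySem.List.len seed_g then
        all_seeds_list ++ [PySem.List.pyGetD all_seeds g []]
      else all_seeds_list) []

-- ===== PORT B =====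
-- 'for x, y in zip(xs, xs[1:]): if x == y: return True / return False'
def hasAdjDup : List String → Bool
  | x :: y :: t => if x == y then true else hasAdjDup (y :: t)
  | _ => false

-- 'return [g for g in all_seeds if not has_adjacent_dup(sorted(r[2:] for r in g))]'
def sort_seeds_alt (all_seeds : List (List String)) : List (List String) :=
  all_seeds.filter (fun g =>
    !hasAdjDup (PySem.List.sorted (g.map (fun r => PySem.Str.slice r (some 2) none)) (fun x => x)))

-- ===== PRECONDITION & SPEC =====
def Spec_sort_seeds (all_seeds : List (List String)) (out : List (List String)) : Prop := out = sort_seeds_alt all_seeds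
instance (all_seeds : List (List String)) (out : List (List String)) : Decidable (Spec_sort_seeds all_seeds out) := by unfold Spec_sort_seeds; infer_instance

-- ===== CLAIM (what is proved, stated in full; the proofs are below) =====
def Claim_equal_sort_seeds : Prop := ∀ (all_seeds : List (List String)), Dom_sort_seeds all_seeds → Spec_sort_seeds all_seeds (sort_seeds all_seeds)

-- ===== LEMMAS AND PROOFS =====

-- On a (≤)-sorted list, 'no adjacent equal pair' is exactly 'no duplicates'.
theorem hasAdjDup_eq_false_iff_nodup (ys : List String)
    (h : ys.Pairwise (· ≤ ·)) : hasAdjDup ys = false ↔ ys.Nodup := by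
  induction ys with
  | nil => simp [hasAdjDup]
  | cons x t ih =>
    cases t with
    | nil => simp [hasAdjDup]
    | cons y t' =>
      rcases List.pairwise_cons.mp h with ⟨hx, ht⟩
      by_cases hxy : x = y
      · subst hxy
        simp [hasAdjDup]
      · have : hasAdjDup (x :: y :: t') = hasAdjDup (y :: t') := by
          simp [hasAdjDup, hxy]
        rw [this, ih ht]
        constructor
        · intro hnd
          refine List.nodup_cons.mpr ⟨?_, hnd⟩
          intro hmem
          rcases List.mem_cons.mp hmem with h1 | h2
          · exact hxy h1
          · -- x ∈ t': x ≤ y (from hx) and y ≤ x (from pairwise of y::t'), so x = y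
            have hxley : x ≤ y := hx y (List.mem_cons_self)
            have hylex : y ≤ x := (List.pairwise_cons.mp ht).1 x h2
            exact hxy (le_antisymm hxley hylex)
        · intro hnd
          exact (List.nodup_cons.mp hnd).2

-- Python's 'len(set(xs)) == len(xs)' is exactly Nodup.
theorem ofList_length_eq_iff_nodup {α : Type} [BEq α] [LawfulBEq α] (xs : List α) :
    (PySem.Set.ofList xs).length = xs.length ↔ xs.Nodup := by
  constructor
  · intro hlen
    have hsub : PySem.Set.ofList xs ⊆ xs := fun a ha => (PySem.Set.mem_ofList xs a).mp ha
    have hperm := (PySem.Set.nodup_ofList xs |>.subperm hsub).perm_of_length_le (le_of_eq hlen.symm)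
    exact hperm.nodup (PySem.Set.nodup_ofList xs)
  · intro hnd
    rw [PySem.Set.ofList_eq_self_of_nodup xs hnd]

-- A's per-group test equals B's per-group test.
theorem pred_eq (g : List String) :
    (decide (PySem.Set.len (PySem.Set.ofList (g.map (fun r => PySem.Str.slice r (some 2) none)))
       = PySem.List.len (g.map (fun r => PySem.Str.slice r (some 2) none))))
    = !hasAdjDup (PySem.List.sorted (g.map (fun r => PySem.Str.slice r (some 2) none)) (fun x => x)) := by
  set xs := g.map (fun r => PySem.Str.slice r (some 2) none) with hxs
  have h1 : (PySem.Set.len (PySem.Set.ofList xs) = PySem.List.len xs) ↔ xs.Nodup := by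
    simp [PySem.Set.len, PySem.List.len]
    exact_mod_cast ofList_length_eq_iff_nodup xs
  have hperm := PySem.List.sorted_perm xs (fun x => x) false
  have h2 := hasAdjDup_eq_false_iff_nodup (PySem.List.sorted xs (fun x => x))
    (by simpa using PySem.List.sorted_pairwise xs (fun x => x))
  rcases hb : hasAdjDup (PySem.List.sorted xs (fun x => x)) with _ | _
  · simp only [Bool.not_false, decide_eq_true_eq]
    exact h1.mpr (hperm.nodup (h2.mp hb))
  · simp only [Bool.not_true, decide_eq_false_iff_not]
    intro hc
    have : (PySem.List.sorted xs (fun x => x)).Nodup := hperm.symm.nodup (h1.mp hc)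
    rw [h2.mpr this] at hb
    exact Bool.false_ne_true hb

theorem sort_seeds_eq (all_seeds : List (List String)) :
    sort_seeds all_seeds = sort_seeds_alt all_seeds := by
  unfold sort_seeds
  rw [PySem.List.foldl_pyRange_zero_pyGetD all_seeds []
    (fun acc g => if PySem.Set.len (PySem.Set.ofList (g.map (fun r => PySem.Str.slice r (some 2) none)))
        = PySem.List.len (g.map (fun r => PySem.Str.slice r (some 2) none))
      then acc ++ [g] else acc) []]
  have := PySem.List.foldl_append_if
    (fun g : List String => decide (PySem.Set.len (PySem.Set.ofList (g.map (fun r => PySem.Str.slice r (some 2) none)))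
        = PySem.List.len (g.map (fun r => PySem.Str.slice r (some 2) none))))
    (fun g => g) all_seeds []
  simp only [decide_eq_true_eq] at this
  rw [show (fun (acc : List (List String)) (g : List String) =>
      if PySem.Set.len (PySem.Set.ofList (g.map (fun r => PySem.Str.slice r (some 2) none)))
          = PySem.List.len (g.map (fun r => PySem.Str.slice r (some 2) none))
        then acc ++ [g] else acc) = (fun acc g =>
      if decide (PySem.Set.len (PySem.Set.ofList (g.map (fun r => PySem.Str.slice r (some 2) none)))
          = PySem.List.len (g.map (fun r => PySem.Str.slice r (some 2) none))) = true
        then acc ++ [g] else acc) from by funext acc g; simp]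
  rw [PySem.List.foldl_append_if, List.nil_append, List.map_id']
  unfold sort_seeds_alt
  apply List.filter_congr
  intro g _
  exact pred_eq g

-- ===== VERDICT (by name: the statement is the Claim_ definition above) =====
theorem sort_seeds_spec : Claim_equal_sort_seeds := by
  intro all_seeds _
  unfold Spec_sort_seeds
  exact sort_seeds_eq all_seeds
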